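-- pv_equiv track=rewrite | github.com/xuzhidong-netizen/2.py | song_info.py | dance_count
-- ===== SOURCE A (Python) =====
-- def dance_count(names, dance_type):
--     # 查找names中还有多少首type
--     length = len(dance_type)
--     num = [0] * length
--     for a in names:
--         for i in range(0, length):
--             if a.count(dance_type[i]) > 0:
--                 num[i] = num[i] + 1
--     return num
-- ===== SOURCE B (Python) =====
-- def dance_count(names, dance_type):
--     # hash-set multi-pattern matching: enumerate each name's substrings of the
--     # pattern lengths once and look them up in a set of patterns
--     patterns = set(dance_type)
--     lens = sorted({len(t) for t in dance_type})
--     counts = {t: 0 for t in dance_type}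
--     for a in names:
--         found = set()
--         for L in lens:
--             if L == 0:
--                 found.add('')
--                 continue
--             for i in range(len(a) - L + 1):
--                 sub = a[i:i + L]
--                 if sub in patterns:
--                     found.add(sub)
--         for t in found:
--             counts[t] += 1
--     return [counts[t] for t in dance_type]
-- ===== Notes on version B (the rewrite author's own statement) =====
-- stated objective: faster
-- what changed: Replaces A's per-name scan over every pattern (a.count(t) for each t) by hash-set multi-pattern matching: the patterns go into a set once, each name's substrings of the occurring pattern lengths are enumerated in a single sweep and looked up in that set, and hits are accumulated in a per-pattern counter dict.
import Mathlib
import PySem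

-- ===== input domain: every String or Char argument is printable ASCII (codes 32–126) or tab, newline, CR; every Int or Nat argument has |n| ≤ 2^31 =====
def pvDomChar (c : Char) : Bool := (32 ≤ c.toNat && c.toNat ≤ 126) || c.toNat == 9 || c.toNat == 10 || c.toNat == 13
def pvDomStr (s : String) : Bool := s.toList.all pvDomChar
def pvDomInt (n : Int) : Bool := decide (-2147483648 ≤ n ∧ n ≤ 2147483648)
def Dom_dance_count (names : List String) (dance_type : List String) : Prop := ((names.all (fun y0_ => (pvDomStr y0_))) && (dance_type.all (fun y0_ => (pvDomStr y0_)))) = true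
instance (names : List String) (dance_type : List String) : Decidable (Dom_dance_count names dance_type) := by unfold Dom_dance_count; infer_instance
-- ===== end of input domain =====

-- B replaces A's per-name-per-pattern scan by hash-set multi-pattern matching: it enumerates
-- each name's substrings of the pattern lengths once, looks them up in a set of patterns and
-- accumulates counts in a dict (objective: alternative).


-- ===== PORT A =====
def dance_count (names : List String) (dance_type : List String) : List Int :=
  let length := dance_type.length
  let num : List Int := List.replicate length 0
  names.foldl (fun num a =>
    (PySem.List.pyRange 0 (length : Int) 1).foldl (fun num i =>
      if 0 < PySem.Str.count a (PySem.List.pyGetD dance_type i "") then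
        PySem.List.pySetD num i (PySem.List.pyGetD num i 0 + 1)
      else num) num) num

-- ===== PORT B =====
def dance_count_alt (names : List String) (dance_type : List String) : List Int :=
  let patterns : PySem.Set String := PySem.Set.ofList dance_type
  let lens : List Int :=
    PySem.List.sorted (PySem.Set.ofList (dance_type.map PySem.Str.len)) (fun x => x) false
  let counts0 : PySem.Dict String Int :=
    dance_type.foldl (fun d t => d.insert t 0) PySem.Dict.empty
  let counts :=
    names.foldl (fun counts a =>
      let found : PySem.Set String :=
        lens.foldl (fun found L =>
          if L = 0 then PySem.Set.add found ""
          else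
            (PySem.List.pyRange 0 (PySem.Str.len a - L + 1)).foldl (fun found i =>
              if PySem.Set.contains patterns (PySem.Str.slice a (some i) (some (i + L))) then
                PySem.Set.add found (PySem.Str.slice a (some i) (some (i + L)))
              else found) found) PySem.Set.empty
      found.foldl (fun counts t => counts.modify t 0 (· + 1)) counts) counts0
  dance_type.map (fun t => counts.getD t 0)

-- ===== PRECONDITION & SPEC =====
def Spec_dance_count (names : List String) (dance_type : List String) (out : List Int) : Prop := out = dance_count_alt names dance_type
instance (names : List String) (dance_type : List String) (out : List Int) : Decidable (Spec_dance_count names dance_type out) := by unfold Spec_dance_count; infer_instance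

-- ===== CLAIM (what is proved, stated in full; the proofs are below) =====
def Claim_equal_dance_count : Prop := ∀ (names : List String) (dance_type : List String), Dom_dance_count names dance_type → Spec_dance_count names dance_type (dance_count names dance_type)

-- ===== LEMMAS AND PROOFS =====

-- ---- A side: A returns, per pattern, the number of names containing it ----

-- count.go never decreases the accumulator
theorem count_go_le (sub : List Char) : ∀ (fuel : Nat) (l : List Char) (acc : Nat),
    acc ≤ PySem.Chars.count.go sub fuel l acc := by
  intro fuel
  induction fuel with
  | zero => intro l acc; cases l <;> simp [PySem.Chars.count.go]
  | succ n ih =>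
    intro l acc
    cases l with
    | nil => simp [PySem.Chars.count.go]
    | cons h t =>
      simp only [PySem.Chars.count.go]
      split
      · exact le_trans (Nat.le_succ acc) (ih _ _)
      · exact ih _ _

-- count.go is positive iff the accumulator already is or sub occurs in l
theorem count_go_pos (sub : List Char) (hsub : sub ≠ []) :
    ∀ (fuel : Nat) (l : List Char) (acc : Nat), l.length ≤ fuel →
    (0 < PySem.Chars.count.go sub fuel l acc ↔ 0 < acc ∨ sub <:+: l) := by
  intro fuel
  induction fuel with
  | zero =>
    intro l acc hl
    have : l = [] := List.eq_nil_of_length_eq_zero (Nat.le_zero.mp hl)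
    subst this
    simp [PySem.Chars.count.go, List.infix_iff_prefix_suffix, hsub]
  | succ n ih =>
    intro l acc hl
    cases l with
    | nil => simp [PySem.Chars.count.go, List.infix_iff_prefix_suffix, hsub]
    | cons h t =>
      simp only [PySem.Chars.count.go]
      split
      · rename_i hpre
        constructor
        · intro _
          right
          exact (List.prefix_iff_eq_take.mp (List.isPrefixOf_iff_prefix.mp hpre)).symm ▸
            (List.take_prefix _ _).isInfix
        · intro _
          exact lt_of_lt_of_le (Nat.succ_pos acc) (count_go_le sub n _ _)
      · rename_i hpre
        have ht : t.length ≤ n := by simpa using Nat.succ_le_succ_iff.mp hl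
        rw [ih t acc ht]
        have hnp : ¬ sub <+: (h :: t) := fun hp => hpre (List.isPrefixOf_iff_prefix.mpr hp)
        constructor
        · rintro (ha | hi)
          · exact Or.inl ha
          · exact Or.inr (List.infix_cons hi)
        · rintro (ha | hi)
          · exact Or.inl ha
          · rcases List.infix_cons_iff.mp hi with hp | hi'
            · exact absurd hp hnp
            · exact Or.inr hi'

-- Python's a.count(sub) > 0 is exactly 'sub in a'
theorem str_count_pos_iff_isIn (a sub : String) :
    (0 < PySem.Str.count a sub) ↔ PySem.Str.isIn sub a = true := by
  rw [PySem.Str.count_eq, PySem.Str.isIn_eq]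
  unfold PySem.Chars.count
  split
  · rename_i he
    have : sub.toList = [] := by simpa [List.isEmpty_iff] using he
    simp [this, PySem.Chars.isIn_nil]
  · rename_i he
    have hsub : sub.toList ≠ [] := by simpa [List.isEmpty_iff] using he
    rw [count_go_pos sub.toList hsub a.toList.length a.toList 0 le_rfl,
        PySem.Chars.isIn_iff_infix]
    simp

-- the per-index update used in the loop-invariant characterisation of A's inner loop
def pvUpd (a : String) (c : Int) (t : String) : Int :=
  if PySem.Str.isIn t a then c + 1 else c

-- A's inner loop over the first m indices is a zipWith on the first m entries
theorem inner_take (a : String) (dt : List String) (num : List Int)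
    (hlen : num.length = dt.length) :
    ∀ m, m ≤ dt.length →
    (PySem.List.pyRange 0 (m : Int) 1).foldl (fun num i =>
      if 0 < PySem.Str.count a (PySem.List.pyGetD dt i "") then
        PySem.List.pySetD num i (PySem.List.pyGetD num i 0 + 1)
      else num) num
    = List.zipWith (pvUpd a) (num.take m) (dt.take m) ++ num.drop m := by
  intro m
  induction m with
  | zero => simp [PySem.List.pyRange_one_eq_nil]
  | succ m ih =>
    intro hm
    have hm' : m ≤ dt.length := Nat.le_of_succ_le hm
    have hmlt : m < dt.length := hm
    have hmn : m < num.length := hlen ▸ hmlt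
    have hcast : ((m : Int) + 1) = ((m + 1 : Nat) : Int) := by push_cast; ring
    rw [← hcast, PySem.List.pyRange_one_succ_right (by positivity), List.foldl_append, ih hm']
    set num' : List Int := List.zipWith (pvUpd a) (num.take m) (dt.take m) ++ num.drop m with hnum'
    have hlen' : num'.length = num.length := by
      simp [hnum', hlen]
      omega
    have hget_dt : PySem.List.pyGetD dt (m : Int) "" = dt[m] :=
      PySem.List.pyGetD_natCast dt m "" ▸ by simp [hmlt]
    have hpre_len : (List.zipWith (pvUpd a) (num.take m) (dt.take m)).length = m := by
      simp; omega
    have hget_num' : PySem.List.pyGetD num' (m : Int) 0 = num[m] := by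
      rw [PySem.List.pyGetD_natCast num' m 0]
      have : num'[m]? = some num[m] := by
        rw [hnum', List.getElem?_append_right (by omega), hpre_len]
        simp [hmn]
      simp [this]
    have hdrop : num.drop m = num[m] :: num.drop (m + 1) := List.drop_eq_getElem_cons hmn
    have htake : num.take (m + 1) = num.take m ++ [num[m]] := List.take_succ_eq_append_getElem hmn
    have htakedt : dt.take (m + 1) = dt.take m ++ [dt[m]] := List.take_succ_eq_append_getElem hmlt
    have hzip : List.zipWith (pvUpd a) (num.take (m + 1)) (dt.take (m + 1))
        = List.zipWith (pvUpd a) (num.take m) (dt.take m) ++ [pvUpd a num[m] dt[m]] := by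
      rw [htake, htakedt, List.zipWith_append (by simp; omega)]
      simp
    simp only [List.foldl_cons, List.foldl_nil, hget_dt, hget_num']
    simp only [str_count_pos_iff_isIn]
    by_cases hin : PySem.Str.isIn dt[m] a = true
    · rw [if_pos hin, PySem.List.pySetD_natCast, hzip]
      have hset : num'.set m (num[m] + 1)
          = List.zipWith (pvUpd a) (num.take m) (dt.take m) ++ (num[m] + 1) :: num.drop (m + 1) := by
        rw [hnum', List.set_append]
        simp only [hpre_len, lt_irrefl, if_false, Nat.sub_self]
        rw [hdrop, List.set_cons_zero]
      rw [hset]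
      simp only [pvUpd, hin, if_true, List.append_assoc, List.singleton_append]
    · rw [if_neg hin, hzip, hnum', hdrop]
      rw [Bool.not_eq_true] at hin
      simp only [pvUpd, hin, Bool.false_eq_true, if_false, List.append_assoc, List.singleton_append]

-- A's inner loop over all indices
theorem inner_full (a : String) (dt : List String) (num : List Int)
    (hlen : num.length = dt.length) :
    (PySem.List.pyRange 0 (dt.length : Int) 1).foldl (fun num i =>
      if 0 < PySem.Str.count a (PySem.List.pyGetD dt i "") then
        PySem.List.pySetD num i (PySem.List.pyGetD num i 0 + 1)
      else num) num
    = List.zipWith (pvUpd a) num dt := by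
  have := inner_take a dt num hlen dt.length le_rfl
  simpa [List.take_of_length_le (le_of_eq hlen), List.drop_of_length_le (le_of_eq hlen)] using this

-- composing two zipWiths against the same right list
theorem zipWith_zipWith_right {α β : Type} (f g : α → β → α) :
    ∀ (xs : List α) (ys : List β),
    List.zipWith f (List.zipWith g xs ys) ys = List.zipWith (fun c t => f (g c t) t) xs ys := by
  intro xs
  induction xs with
  | nil => intro ys; simp
  | cons x xs ih => intro ys; cases ys <;> simp [ih]

-- zipWith projecting the left list, when the lengths agree
theorem zipWith_fst_eq {α β : Type} :
    ∀ (xs : List α) (ys : List β), xs.length = ys.length →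
    List.zipWith (fun c _ => c) xs ys = xs := by
  intro xs
  induction xs with
  | nil => intro ys _; simp
  | cons x xs ih =>
    intro ys h
    cases ys with
    | nil => simp at h
    | cons y ys =>
      have := ih ys (by simpa using h)
      simp [this]

-- A's outer loop accumulates, per index, the number of names containing that type
theorem outer_fold (dt : List String) :
    ∀ (names : List String) (num : List Int), num.length = dt.length →
    names.foldl (fun num a =>
      (PySem.List.pyRange 0 (dt.length : Int) 1).foldl (fun num i =>
        if 0 < PySem.Str.count a (PySem.List.pyGetD dt i "") then
          PySem.List.pySetD num i (PySem.List.pyGetD num i 0 + 1)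
        else num) num) num
    = List.zipWith (fun c t => c + (names.countP (fun a => PySem.Str.isIn t a) : Int)) num dt := by
  intro names
  induction names with
  | nil =>
    intro num hlen
    simp only [List.foldl_nil, List.countP_nil, Nat.cast_zero, add_zero]
    exact (zipWith_fst_eq num dt hlen).symm
  | cons a names ih =>
    intro num hlen
    simp only [List.foldl_cons]
    rw [inner_full a dt num hlen, ih _ (by simp [hlen]),
      zipWith_zipWith_right]
    have hfun : (fun (c : Int) (t : String) =>
        pvUpd a c t + (names.countP (fun a => PySem.Str.isIn t a) : Int))
        = fun c t => c + ((a :: names).countP (fun a => PySem.Str.isIn t a) : Int) := by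
      funext c t
      simp only [pvUpd, List.countP_cons]
      split
      · push_cast; ring
      · push_cast; ring
    rw [hfun]

-- zipWith against a replicate of the right length is a map
theorem zipWith_replicate_left_map {α β : Type} (f : α → β → α) (c : α) :
    ∀ (ys : List β), List.zipWith f (List.replicate ys.length c) ys = ys.map (f c) := by
  intro ys
  induction ys with
  | nil => simp
  | cons y ys ih => simpa [List.replicate_succ] using ih

-- A's result in closed form
theorem a_eq (names : List String) (dt : List String) :
    dance_count names dt = dt.map (fun t => (names.countP (fun a => PySem.Str.isIn t a) : Int)) := by
  unfold dance_count
  rw [outer_fold dt names (List.replicate dt.length 0) (by simp), zipWith_replicate_left_map]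
  simp

-- ---- B side: proof-side names for the port's subterms ----

def pvPatterns (dance_type : List String) : PySem.Set String := PySem.Set.ofList dance_type

def pvLens (dance_type : List String) : List Int :=
  PySem.List.sorted (PySem.Set.ofList (dance_type.map PySem.Str.len)) (fun x => x) false

def pvInner (dance_type : List String) (a : String) (L : Int) (found : PySem.Set String) :
    PySem.Set String :=
  (PySem.List.pyRange 0 (PySem.Str.len a - L + 1)).foldl (fun found i =>
    if PySem.Set.contains (pvPatterns dance_type) (PySem.Str.slice a (some i) (some (i + L))) then
      PySem.Set.add found (PySem.Str.slice a (some i) (some (i + L)))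
    else found) found

def pvFound (dance_type : List String) (a : String) : PySem.Set String :=
  (pvLens dance_type).foldl (fun found L =>
    if L = 0 then PySem.Set.add found "" else pvInner dance_type a L found) PySem.Set.empty

-- B's result through the proof-side names
theorem alt_eq (names : List String) (dt : List String) :
    dance_count_alt names dt =
      dt.map (fun t =>
        (names.foldl (fun counts a =>
            (pvFound dt a).foldl (fun counts t => counts.modify t 0 (· + 1)) counts)
          (dt.foldl (fun d t => d.insert t 0) PySem.Dict.empty)).getD t 0) := rfl

-- membership in the inner index fold
theorem mem_slicefold (P : PySem.Set String) (a : String) (L : Int) (idxs : List Int) :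
    ∀ (found : PySem.Set String) (x : String),
    (x ∈ idxs.foldl (fun found i =>
        if PySem.Set.contains P (PySem.Str.slice a (some i) (some (i + L))) then
          PySem.Set.add found (PySem.Str.slice a (some i) (some (i + L)))
        else found) found)
    ↔ x ∈ found ∨ (x ∈ P ∧ ∃ i ∈ idxs, PySem.Str.slice a (some i) (some (i + L)) = x) := by
  induction idxs with
  | nil => intro found x; simp
  | cons i is ih =>
    intro found x
    simp only [List.foldl_cons]
    by_cases h : PySem.Set.contains P (PySem.Str.slice a (some i) (some (i + L))) = true
    · rw [if_pos h, ih]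
      have hP : PySem.Str.slice a (some i) (some (i + L)) ∈ P := by
        simpa [PySem.Set.contains] using h
      rw [PySem.Set.mem_add]
      constructor
      · rintro ((hf | rfl) | ⟨hp, j, hj, hs⟩)
        · exact Or.inl hf
        · exact Or.inr ⟨hP, i, List.mem_cons_self, rfl⟩
        · exact Or.inr ⟨hp, j, List.mem_cons_of_mem i hj, hs⟩
      · rintro (hf | ⟨hp, j, hj, hs⟩)
        · exact Or.inl (Or.inl hf)
        · rcases List.mem_cons.mp hj with rfl | hj'
          · exact Or.inl (Or.inr hs.symm)
          · exact Or.inr ⟨hp, j, hj', hs⟩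
    · rw [if_neg h, ih]
      constructor
      · rintro (hf | ⟨hp, j, hj, hs⟩)
        · exact Or.inl hf
        · exact Or.inr ⟨hp, j, List.mem_cons_of_mem i hj, hs⟩
      · rintro (hf | ⟨hp, j, hj, hs⟩)
        · exact Or.inl hf
        · rcases List.mem_cons.mp hj with rfl | hj'
          · exact absurd (by simpa [PySem.Set.contains] using
              (hs ▸ hp : PySem.Str.slice a (some j) (some (j + L)) ∈ P)) h
          · exact Or.inr ⟨hp, j, hj', hs⟩

-- membership in a name's found set, over an arbitrary list of lengths
theorem mem_lensfold (dt : List String) (a : String) (lens : List Int) :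
    ∀ (found : PySem.Set String) (x : String),
    (x ∈ lens.foldl (fun found L =>
        if L = 0 then PySem.Set.add found "" else pvInner dt a L found) found)
    ↔ x ∈ found ∨ ((0 : Int) ∈ lens ∧ x = "") ∨
      (x ∈ pvPatterns dt ∧ ∃ L ∈ lens, L ≠ 0 ∧ ∃ i, 0 ≤ i ∧ i < PySem.Str.len a - L + 1 ∧
        PySem.Str.slice a (some i) (some (i + L)) = x) := by
  induction lens with
  | nil => intro found x; simp
  | cons L Ls ih =>
    intro found x
    simp only [List.foldl_cons]
    by_cases h0 : L = 0
    · subst h0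
      rw [if_pos rfl, ih, PySem.Set.mem_add]
      constructor
      · rintro ((hf | rfl) | ⟨h0, rfl⟩ | ⟨hp, M, hM, hM0, hi⟩)
        · exact Or.inl hf
        · exact Or.inr (Or.inl ⟨List.mem_cons_self, rfl⟩)
        · exact Or.inr (Or.inl ⟨List.mem_cons_of_mem 0 h0, rfl⟩)
        · exact Or.inr (Or.inr ⟨hp, M, List.mem_cons_of_mem 0 hM, hM0, hi⟩)
      · rintro (hf | ⟨_, rfl⟩ | ⟨hp, M, hM, hM0, hi⟩)
        · exact Or.inl (Or.inl hf)
        · exact Or.inl (Or.inr rfl)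
        · rcases List.mem_cons.mp hM with rfl | hM'
          · exact absurd rfl hM0
          · exact Or.inr (Or.inr ⟨hp, M, hM', hM0, hi⟩)
    · rw [if_neg h0, ih]
      unfold pvInner
      rw [mem_slicefold]
      constructor
      · rintro ((hf | ⟨hp, i, hi, hs⟩) | ⟨hz, rfl⟩ | ⟨hp, M, hM, hM0, hi⟩)
        · exact Or.inl hf
        · rcases PySem.List.mem_pyRange_one.mp hi with ⟨hi0, hilt⟩
          exact Or.inr (Or.inr ⟨hp, L, List.mem_cons_self, h0, i, hi0, hilt, hs⟩)
        · exact Or.inr (Or.inl ⟨List.mem_cons_of_mem L hz, rfl⟩)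
        · exact Or.inr (Or.inr ⟨hp, M, List.mem_cons_of_mem L hM, hM0, hi⟩)
      · rintro (hf | ⟨hz, rfl⟩ | ⟨hp, M, hM, hM0, i, hi0, hilt, hs⟩)
        · exact Or.inl (Or.inl hf)
        · rcases List.mem_cons.mp hz with h | hz'
          · exact absurd h.symm h0
          · exact Or.inr (Or.inl ⟨hz', rfl⟩)
        · rcases List.mem_cons.mp hM with rfl | hM'
          · exact Or.inl (Or.inr ⟨hp, i, PySem.List.mem_pyRange_one.mpr ⟨hi0, hilt⟩, hs⟩)
          · exact Or.inr (Or.inr ⟨hp, M, hM', hM0, i, hi0, hilt, hs⟩)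

-- the folds preserve Nodup
theorem nodup_slicefold (P : PySem.Set String) (a : String) (L : Int) (idxs : List Int) :
    ∀ (found : PySem.Set String), found.Nodup →
    (idxs.foldl (fun found i =>
        if PySem.Set.contains P (PySem.Str.slice a (some i) (some (i + L))) then
          PySem.Set.add found (PySem.Str.slice a (some i) (some (i + L)))
        else found) found).Nodup := by
  induction idxs with
  | nil => intro found h; simpa using h
  | cons i is ih =>
    intro found h
    simp only [List.foldl_cons]
    split
    · exact ih _ (PySem.Set.nodup_add found _ h)
    · exact ih _ h

theorem nodup_pvFound (dt : List String) (a : String) : (pvFound dt a).Nodup := by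
  unfold pvFound
  generalize pvLens dt = lens
  have key : ∀ (l : List Int) (found : PySem.Set String), found.Nodup →
      (l.foldl (fun found L =>
        if L = 0 then PySem.Set.add found "" else pvInner dt a L found) found).Nodup := by
    intro l
    induction l with
    | nil => intro found h; simpa using h
    | cons L Ls ih =>
      intro found h
      simp only [List.foldl_cons]
      split
      · exact ih _ (PySem.Set.nodup_add found _ h)
      · exact ih _ (nodup_slicefold (pvPatterns dt) a L _ found h)
  exact key lens PySem.Set.empty (by simp [PySem.Set.empty])

-- members of pvLens are the pattern lengths
theorem mem_pvLens (dt : List String) (L : Int) :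
    L ∈ pvLens dt ↔ L ∈ dt.map PySem.Str.len := by
  unfold pvLens
  rw [(PySem.List.sorted_perm _ _ _).mem_iff, PySem.Set.mem_ofList]

-- a pattern is in a name's found set exactly when it occurs in the name
theorem mem_pvFound (dt : List String) (a : String) (t : String) (ht : t ∈ dt) :
    t ∈ pvFound dt a ↔ PySem.Str.isIn t a = true := by
  unfold pvFound
  rw [mem_lensfold]
  constructor
  · rintro (hf | ⟨_, rfl⟩ | ⟨_, L, hL, _, i, hi0, _, hs⟩)
    · simp [PySem.Set.empty] at hf
    · rw [PySem.Str.isIn_iff_infix]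
      simp
    · -- t is a slice of a, hence an infix
      rcases List.mem_map.mp ((mem_pvLens dt L).mp hL) with ⟨t', _, hlen⟩
      have hL0 : 0 ≤ L := hlen ▸ (by rw [PySem.Str.len_eq]; positivity)
      obtain ⟨n, rfl⟩ : ∃ n : Nat, L = (n : Int) := ⟨L.toNat, (Int.toNat_of_nonneg hL0).symm⟩
      obtain ⟨m, rfl⟩ : ∃ m : Nat, i = (m : Int) := ⟨i.toNat, (Int.toNat_of_nonneg hi0).symm⟩
      have hslice : PySem.Str.slice a (some (m : Int)) (some ((m : Int) + (n : Int)))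
          = String.ofList (List.take n (List.drop m a.toList)) := by
        unfold PySem.Str.slice
        rw [show PySem.Chars.slice a.toList (some (m : Int)) (some ((m : Int) + (n : Int)))
              = PySem.List.slice a.toList (some (m : Int)) (some ((m : Int) + (n : Int))) from rfl,
            PySem.List.slice_natCast_add]
      rw [hslice] at hs
      rw [PySem.Str.isIn_iff_infix, ← hs, String.toList_ofList]
      exact ((List.take_prefix n (List.drop m a.toList)).isInfix).trans
        (List.drop_suffix m a.toList).isInfix
  · intro hin
    by_cases ht0 : t.toList = []
    · refine Or.inr (Or.inl ⟨?_, ?_⟩)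
      · exact (mem_pvLens dt 0).mpr (List.mem_map.mpr ⟨t, ht, by simp [PySem.Str.len_eq, ht0]⟩)
      · calc t = String.ofList t.toList := String.ofList_toList.symm
          _ = "" := by rw [ht0]
    · -- t occurs in a: produce the slice witness
      have hinf : ∃ j, t.toList <+: a.toList.drop j := by
        rw [PySem.Chars.exists_prefix_drop_iff_isIn, ← PySem.Str.isIn_eq]
        exact hin
      obtain ⟨j, hpre⟩ := hinf
      have hn0 : t.toList.length ≠ 0 := fun h => ht0 (List.eq_nil_of_length_eq_zero h)
      have hjn : t.toList.length ≤ a.toList.length - j := by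
        have := hpre.length_le
        simpa using this
      have hna : j + t.toList.length ≤ a.toList.length := by omega
      refine Or.inr (Or.inr ⟨(PySem.Set.mem_ofList dt t).mpr ht, (t.toList.length : Int), ?_, ?_,
        (j : Int), by positivity, ?_, ?_⟩)
      · exact (mem_pvLens dt (t.toList.length : Int)).mpr
          (List.mem_map.mpr ⟨t, ht, by rw [PySem.Str.len_eq]⟩)
      · exact_mod_cast hn0
      · rw [PySem.Str.len_eq]
        have : (j : Int) + (t.toList.length : Int) ≤ (a.toList.length : Int) := by
          exact_mod_cast hna
        omega
      · have hslice : PySem.Str.slice a (some (j : Int)) (some ((j : Int) + (t.toList.length : Int)))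
            = String.ofList (List.take t.toList.length (List.drop j a.toList)) := by
          unfold PySem.Str.slice
          rw [show PySem.Chars.slice a.toList (some (j : Int)) (some ((j : Int) + (t.toList.length : Int)))
                = PySem.List.slice a.toList (some (j : Int)) (some ((j : Int) + (t.toList.length : Int))) from rfl,
              PySem.List.slice_natCast_add]
        rw [hslice, ← List.prefix_iff_eq_take.mp hpre, String.ofList_toList]

-- the per-name counting fold adds, per key, the number of names whose found set holds it
theorem getD_namesfold (dt : List String) (names : List String) (t : String) :
    ∀ (d : PySem.Dict String Int),
    (names.foldl (fun counts a =>
        (pvFound dt a).foldl (fun counts t => counts.modify t 0 (· + 1)) counts) d).getD t 0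
    = d.getD t 0 + (names.countP (fun a => decide (t ∈ pvFound dt a)) : Int) := by
  induction names with
  | nil => intro d; simp
  | cons a ns ih =>
    intro d
    simp only [List.foldl_cons]
    rw [ih, PySem.Dict.getD_foldl_modify_add_one,
        List.Nodup.count (nodup_pvFound dt a), List.countP_cons]
    by_cases hm : t ∈ pvFound dt a
    · simp [hm]; ring
    · simp [hm]

-- the initial dict maps every key to 0
theorem getD_insertzero (dt : List String) :
    ∀ (d : PySem.Dict String Int), (∀ k, d.getD k 0 = 0) →
    ∀ k, (dt.foldl (fun d t => d.insert t 0) d).getD k 0 = 0 := by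
  induction dt with
  | nil => intro d h k; simpa using h k
  | cons t ts ih =>
    intro d h k
    simp only [List.foldl_cons]
    refine ih _ (fun k' => ?_) k
    rw [PySem.Dict.getD_insert]
    split
    · rfl
    · exact h k'

-- ===== VERDICT (by name: the statement is the Claim_ definition above) =====
theorem dance_count_spec : Claim_equal_dance_count := by
  intro names dt _
  unfold Spec_dance_count
  rw [a_eq, alt_eq]
  refine List.map_congr_left (fun t ht => ?_)
  rw [getD_namesfold, getD_insertzero dt PySem.Dict.empty (fun k => by simp) t, zero_add]
  congr 1
  refine congrArg Nat.cast (List.countP_congr (fun a _ => ?_))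
  cases hb : PySem.Str.isIn t a with
  | false =>
    simp only [Bool.false_eq_true, false_iff, decide_eq_true_eq]
    exact fun h => by simpa using ((mem_pvFound dt a t ht).mp h).symm.trans hb
  | true =>
    simp only [true_iff, decide_eq_true_eq]
    exact (mem_pvFound dt a t ht).mpr hb
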